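-- pv_equiv track=rewrite | github.com/KtranH/KhoiTran_LeetCode | Python/Greatest Common Divisor of Strings/main.py | check_in_string
-- ===== SOURCE A (Python) =====
-- def check_in_string(word1, word2):
--     if len(word1) > len(word2):
--         for i in range(len(word1)):
--             if word1[i] != word2[i % len(word2)]:
--                 return False
--     elif len(word1) < len(word2):
--         for i in range(len(word2)):
--             if word2[i] != word1[i % len(word1)]:
--                 return False
--     else:
--         if word1 not in word2:
--             return False
--     return True
-- ===== SOURCE B (Python) =====
-- def check_in_string(word1, word2):
--     if len(word1) == len(word2):
--         return word1 == word2
--     s, t = (word1, word2) if len(word1) > len(word2) else (word2, word1)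
--     if not t:
--         return False
--     return (t * (len(s) // len(t) + 1))[:len(s)] == s
-- ===== Notes on version B (the rewrite author's own statement) =====
-- stated objective: simpler
-- what changed: Replaces the per-index modular-comparison loop with building the shorter string repeated enough times and comparing its prefix to the longer string; the equal-length substring test becomes a plain equality.
import Mathlib
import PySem

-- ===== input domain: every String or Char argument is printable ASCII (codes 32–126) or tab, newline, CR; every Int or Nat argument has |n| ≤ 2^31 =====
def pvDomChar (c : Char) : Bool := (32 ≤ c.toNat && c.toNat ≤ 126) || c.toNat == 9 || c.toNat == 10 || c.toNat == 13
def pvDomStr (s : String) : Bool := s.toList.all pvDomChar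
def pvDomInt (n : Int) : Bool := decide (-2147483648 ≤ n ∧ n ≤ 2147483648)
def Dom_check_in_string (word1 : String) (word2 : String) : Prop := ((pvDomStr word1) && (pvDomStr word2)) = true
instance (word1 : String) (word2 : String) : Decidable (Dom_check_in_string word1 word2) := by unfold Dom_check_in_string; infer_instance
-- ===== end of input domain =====

-- B replaces the index-by-index modular comparison loop with building the repeated
-- shorter string and comparing a prefix (objective: simpler).

-- ===== PORT A =====
-- the per-index loop 'for i in range(len(long)): if long[i] != short[i % len(short)]: return False'
-- (indices are always in range for 'long'; 'i % len(short)' is in range whenever short ≠ [],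
--  which Pre_ guarantees in the branches that reach this loop — Python raises otherwise)
def aLoop (long short : List Char) (i : Nat) : Bool :=
  if _h : i < long.length then
    if long.getD i 'a' ≠ short.getD (i % short.length) 'a' then false
    else aLoop long short (i + 1)
  else true
termination_by long.length - i

def check_in_string (word1 : String) (word2 : String) : Bool :=
  if word1.toList.length > word2.toList.length then
    aLoop word1.toList word2.toList 0
  else if word1.toList.length < word2.toList.length then
    aLoop word2.toList word1.toList 0
  else
    if PySem.Str.isIn word1 word2 = false then false else true

-- ===== PORT B =====
def check_in_string_alt (word1 : String) (word2 : String) : Bool :=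
  let l1 := word1.toList
  let l2 := word2.toList
  if l1.length = l2.length then l1 == l2
  else
    let st := if l1.length > l2.length then (l1, l2) else (l2, l1)
    let s := st.1
    let t := st.2
    if t.isEmpty then false
    else ((List.replicate (s.length / t.length + 1) t).flatten.take s.length) == s

-- ===== PRECONDITION & SPEC =====
-- Pre_ excludes exactly the inputs on which Python A raises ZeroDivisionError:
-- lengths differ and the shorter string is empty ('i % 0').
def Pre_check_in_string (word1 : String) (word2 : String) : Prop :=
  word1.toList.length = word2.toList.length ∨ (word1.toList ≠ [] ∧ word2.toList ≠ [])
instance (word1 : String) (word2 : String) : Decidable (Pre_check_in_string word1 word2) := by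
  unfold Pre_check_in_string; infer_instance

def pvWitness_check_in_string : String × String := ("abab", "ab")

def Spec_check_in_string (word1 : String) (word2 : String) (out : Bool) : Prop :=
  out = check_in_string_alt word1 word2
instance (word1 : String) (word2 : String) (out : Bool) : Decidable (Spec_check_in_string word1 word2 out) := by
  unfold Spec_check_in_string; infer_instance

-- ===== CLAIM (what is proved, stated in full; the proofs are below) =====
def Claim_equal_check_in_string : Prop := ∀ (word1 : String) (word2 : String), Dom_check_in_string word1 word2 → Pre_check_in_string word1 word2 → Spec_check_in_string word1 word2 (check_in_string word1 word2)

-- ===== LEMMAS AND PROOFS =====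

-- the modular pointwise condition both programs decide
abbrev PtMod (s t : List Char) : Prop :=
  ∀ j : Nat, j < s.length → s.getD j 'a' = t.getD (j % t.length) 'a'

lemma aLoop_eq (long short : List Char) (i : Nat) :
    aLoop long short i =
      decide (∀ j : Nat, i ≤ j → j < long.length →
        long.getD j 'a' = short.getD (j % short.length) 'a') := by
  unfold aLoop
  split
  · rename_i h
    split
    · rename_i hne
      symm
      rw [decide_eq_false_iff_not]
      intro hall
      exact hne (hall i le_rfl h)
    · rename_i heq
      rw [ne_eq, not_not] at heq
      rw [aLoop_eq long short (i + 1)]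
      congr 1
      apply propext
      constructor
      · intro hall j hij hj
        rcases Nat.eq_or_lt_of_le hij with rfl | hlt
        · exact heq
        · exact hall j hlt hj
      · intro hall j hij hj
        exact hall j (Nat.le_of_succ_le hij) hj
  · rename_i h
    rw [Nat.not_lt] at h
    symm
    rw [decide_eq_true_iff]
    intro j hij hj
    exact absurd (le_trans h hij) (Nat.not_le.mpr hj)
termination_by long.length - i

lemma aLoop_zero (s t : List Char) : aLoop s t 0 = decide (PtMod s t) := by
  rw [aLoop_eq]
  unfold PtMod
  congr 1
  apply propext
  exact ⟨fun h j hj => h j (Nat.zero_le j) hj, fun h j _ hj => h j hj⟩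

lemma flatten_replicate_length (k : Nat) (t : List Char) :
    (List.replicate k t).flatten.length = k * t.length := by
  induction k with
  | zero => simp
  | succ n ih => simp [List.replicate_succ, ih, Nat.succ_mul, Nat.add_comm]

lemma flatten_replicate_getD (k : Nat) (t : List Char) (ht : t ≠ []) (j : Nat)
    (hj : j < k * t.length) :
    (List.replicate k t).flatten.getD j 'a' = t.getD (j % t.length) 'a' := by
  induction k generalizing j with
  | zero => simp at hj
  | succ n ih =>
    rw [List.replicate_succ, List.flatten_cons]
    by_cases hjt : j < t.length
    · rw [List.getD_append _ _ _ _ hjt, Nat.mod_eq_of_lt hjt]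
    · rw [Nat.not_lt] at hjt
      have htpos : 0 < t.length := List.length_pos_iff.mpr ht
      have hmul : (n + 1) * t.length = n * t.length + t.length := by ring
      rw [List.getD_append_right _ _ _ _ hjt]
      rw [ih (j - t.length) (by omega)]
      congr 1
      conv_lhs => rw [show j - t.length = j - t.length * 1 by omega]
      rw [Nat.sub_mul_mod (by omega)]
  
lemma bLoop_eq (s t : List Char) (ht : t ≠ []) :
    (((List.replicate (s.length / t.length + 1) t).flatten.take s.length) == s) =
      decide (PtMod s t) := by
  have htpos : 0 < t.length := List.length_pos_iff.mpr ht
  have hlen : s.length ≤ (s.length / t.length + 1) * t.length := by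
    rw [Nat.succ_mul]
    have h1 := Nat.div_add_mod' s.length t.length
    have h2 := Nat.mod_lt s.length htpos
    omega
  have hflen : (List.replicate (s.length / t.length + 1) t).flatten.length
      = (s.length / t.length + 1) * t.length := flatten_replicate_length _ _
  have htk : ((List.replicate (s.length / t.length + 1) t).flatten.take s.length).length
      = s.length := by rw [List.length_take, hflen]; omega
  rcases Bool.eq_false_or_eq_true (decide (PtMod s t)) with hd | hd
  swap
  · rw [hd, beq_eq_false_iff_ne]
    rw [decide_eq_false_iff_not] at hd
    intro hEq
    apply hd
    intro j hj
    have hjf : j < (List.replicate (s.length / t.length + 1) t).flatten.length := by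
      rw [hflen]; omega
    have hgd := congrArg (fun l => l.getD j 'a') hEq
    simp only [List.getD_eq_getElem?_getD, List.getElem?_take, if_pos hj] at hgd
    simp only [← List.getD_eq_getElem?_getD] at hgd
    rw [← hgd, flatten_replicate_getD _ _ ht j (by omega)]
  · rw [hd, beq_iff_eq]
    rw [decide_eq_true_iff] at hd
    apply List.ext_getElem htk
    intro j hj1 hj2
    rw [List.getElem_take]
    have hjf : j < (List.replicate (s.length / t.length + 1) t).flatten.length := by
      rw [hflen]; omega
    have h1 : (List.replicate (s.length / t.length + 1) t).flatten[j] =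
        (List.replicate (s.length / t.length + 1) t).flatten.getD j 'a' := by
      rw [List.getD_eq_getElem _ _ hjf]
    rw [h1, flatten_replicate_getD _ _ ht j (by omega), ← hd j hj2,
      List.getD_eq_getElem _ _ hj2]

lemma isIn_eq_of_len_eq (w1 w2 : String)
    (h : w1.toList.length = w2.toList.length) :
    PySem.Str.isIn w1 w2 = (w1.toList == w2.toList) := by
  rcases Bool.eq_false_or_eq_true (PySem.Str.isIn w1 w2) with hb | hb
  swap
  · rw [hb, eq_comm, beq_eq_false_iff_ne]
    rw [PySem.Str.isIn_eq, PySem.Chars.isIn_eq_false_iff] at hb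
    intro hEq; exact hb (hEq ▸ List.infix_rfl)
  · rw [hb, eq_comm, beq_iff_eq]
    rw [PySem.Str.isIn_eq, PySem.Chars.isIn_iff_infix] at hb
    exact hb.sublist.eq_of_length h

-- ===== VERDICT (by name: the statement is the Claim_ definition above) =====
theorem check_in_string_spec : Claim_equal_check_in_string := by
  intro word1 word2 _ hpre
  unfold Spec_check_in_string check_in_string check_in_string_alt
  simp only []
  by_cases hgt : word1.toList.length > word2.toList.length
  · have h2 : word2.toList ≠ [] := by
      rcases hpre with h | h
      · omega
      · exact h.2
    rw [if_pos hgt, if_neg (by omega), if_pos hgt]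
    simp only [List.isEmpty_iff]
    rw [if_neg h2, aLoop_zero, bLoop_eq _ _ h2]
  · by_cases hlt : word1.toList.length < word2.toList.length
    · have h1 : word1.toList ≠ [] := by
        rcases hpre with h | h
        · omega
        · exact h.1
      rw [if_neg hgt, if_pos hlt, if_neg (by omega), if_neg hgt]
      simp only [List.isEmpty_iff]
      rw [if_neg h1, aLoop_zero, bLoop_eq _ _ h1]
    · have heq : word1.toList.length = word2.toList.length := by omega
      rw [if_neg hgt, if_neg hlt, if_pos heq]
      rw [isIn_eq_of_len_eq _ _ heq]
      cases hb : (word1.toList == word2.toList) <;> simp
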